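-- pv_equiv track=rewrite | github.com/pixelatedempathy/ai | dataset_pipeline/orchestration/run_task_5_25_tot_reasoning.py | parse_reasoning_steps
-- ===== SOURCE A (Python) =====
-- def parse_reasoning_steps(reasoning_text: str) -> list[str]:
--     """Parse reasoning text into discrete steps."""
--     # Common patterns for step separation
--     step_indicators = ["Step 1:", "Step 2:", "Step 3:", "First,", "Second,", "Third,", "Then,", "Finally,", "Therefore,"]
--
--     steps = []
--     current_step = ""
--
--     for line in reasoning_text.split("\n"):
--         line = line.strip()
--         if not line:
--             continue
--
--         # Check if this line starts a new step
--         is_new_step = any(line.startswith(indicator) for indicator in step_indicators)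
--
--         if is_new_step and current_step:
--             steps.append(current_step.strip())
--             current_step = line
--         else:
--             current_step += " " + line if current_step else line
--
--     # Add the last step
--     if current_step:
--         steps.append(current_step.strip())
--
--     return steps
-- ===== SOURCE B (Python) =====
-- STEP_INDICATORS = ["Step 1:", "Step 2:", "Step 3:", "First,", "Second,", "Third,", "Then,", "Finally,", "Therefore,"]
--
--
-- def _is_boundary(line):
--     return any(line.startswith(ind) for ind in STEP_INDICATORS)
--
--
-- def parse_reasoning_steps(reasoning_text: str) -> list[str]:
--     """Cut the cleaned line list at boundary indices and join each slice."""
--     lines = [l.strip() for l in reasoning_text.split("\n") if l.strip()]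
--     steps = []
--     i = 0
--     n = len(lines)
--     while i < n:
--         j = i + 1
--         while j < n and not _is_boundary(lines[j]):
--             j += 1
--         steps.append(" ".join(lines[i:j]))
--         i = j
--     return steps
-- ===== Notes on version B (the rewrite author's own statement) =====
-- stated objective: alternative
-- what changed: Replaces A's streaming accumulation into a growing current_step string with a two-phase pass: build the cleaned line list, then cut it into consecutive slices at the boundary indices where a non-initial line starts with an indicator, joining each slice once.
import Mathlib
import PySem

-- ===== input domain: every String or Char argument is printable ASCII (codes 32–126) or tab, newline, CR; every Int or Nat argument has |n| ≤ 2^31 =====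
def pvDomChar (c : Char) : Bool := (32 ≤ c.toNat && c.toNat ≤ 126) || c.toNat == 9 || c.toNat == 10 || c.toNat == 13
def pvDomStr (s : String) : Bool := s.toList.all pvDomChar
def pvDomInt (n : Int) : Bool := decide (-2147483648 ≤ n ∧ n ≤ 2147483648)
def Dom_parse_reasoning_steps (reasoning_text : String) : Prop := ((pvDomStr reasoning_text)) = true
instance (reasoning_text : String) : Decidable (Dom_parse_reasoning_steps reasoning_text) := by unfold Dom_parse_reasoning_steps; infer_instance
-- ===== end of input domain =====

-- ===== PORT A =====
-- B replaces A's streaming string-accumulator pass with a cut-at-boundary grouping of the cleaned line list (alternative decomposition, same cost).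
def pvIndicators : List (List Char) :=
  ["Step 1:".toList, "Step 2:".toList, "Step 3:".toList, "First,".toList, "Second,".toList,
   "Third,".toList, "Then,".toList, "Finally,".toList, "Therefore,".toList]

-- A's loop body: strip the line, skip empties, start a new step on an indicator, else extend current_step
def pvStepA (st : List String × List Char) (rawLine : List Char) : List String × List Char :=
  let line := PySem.Chars.strip rawLine
  if line = [] then st
  else
    let is_new := pvIndicators.any (fun ind => PySem.Chars.startswith line ind)
    if is_new ∧ st.2 ≠ [] then (st.1 ++ [String.ofList (PySem.Chars.strip st.2)], line)
    else (st.1, if st.2 ≠ [] then st.2 ++ ' ' :: line else line)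

def parse_reasoning_steps (reasoning_text : String) : List String :=
  let r := (PySem.Chars.splitOn reasoning_text.toList ['\n']).foldl pvStepA ([], [])
  if r.2 ≠ [] then r.1 ++ [String.ofList (PySem.Chars.strip r.2)] else r.1

-- ===== PORT B =====
-- Source B helper _is_boundary
def pvBoundary (line : List Char) : Bool :=
  pvIndicators.any (fun ind => PySem.Chars.startswith line ind)

-- Source B's index scan: each chunk runs from a boundary (or index 0) up to the next boundary;
-- lines[i:j] is the head line plus the following non-boundary lines.
def pvGroup : List (List Char) → List String
  | [] => []
  | l :: rest =>
      String.ofList (PySem.Chars.join [' '] (l :: rest.takeWhile (fun s => !pvBoundary s)))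
        :: pvGroup (rest.dropWhile (fun s => !pvBoundary s))
termination_by ls => ls.length
decreasing_by
  have := List.length_dropWhile_le (fun s => !pvBoundary s) rest
  simp only [List.length_cons]
  omega

def parse_reasoning_steps_alt (reasoning_text : String) : List String :=
  pvGroup (((PySem.Chars.splitOn reasoning_text.toList ['\n']).map PySem.Chars.strip).filter
    (fun l => decide (l ≠ [])))

-- ===== PRECONDITION & SPEC =====
def Spec_parse_reasoning_steps (reasoning_text : String) (out : List String) : Prop := out = parse_reasoning_steps_alt reasoning_text
instance (reasoning_text : String) (out : List String) : Decidable (Spec_parse_reasoning_steps reasoning_text out) := by unfold Spec_parse_reasoning_steps; infer_instance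

-- ===== CLAIM (what is proved, stated in full; the proofs are below) =====
def Claim_equal_parse_reasoning_steps : Prop := ∀ (reasoning_text : String), Dom_parse_reasoning_steps reasoning_text → Spec_parse_reasoning_steps reasoning_text (parse_reasoning_steps reasoning_text)

-- ===== LEMMAS AND PROOFS =====

-- proof-side helpers
def pvClean (s : List Char) : Prop := s ≠ [] ∧ PySem.Chars.strip s = s

def pvCleanStep (st : List String × List Char) (line : List Char) : List String × List Char :=
  if pvBoundary line ∧ st.2 ≠ [] then (st.1 ++ [String.ofList (PySem.Chars.strip st.2)], line)
  else (st.1, if st.2 ≠ [] then st.2 ++ ' ' :: line else line)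

def pvFin (st : List String × List Char) : List String :=
  if st.2 ≠ [] then st.1 ++ [String.ofList (PySem.Chars.strip st.2)] else st.1

lemma pv_dropWhile_cons_of_head {p : Char → Bool} {c : Char} {t : List Char}
    (h : List.dropWhile p (c :: t) = c :: t) : p c = false := by
  cases hc : p c
  · rfl
  · exfalso
    rw [List.dropWhile_cons, if_pos hc] at h
    have := List.length_dropWhile_le p t
    rw [h] at this
    simp at this

lemma pv_length_rstrip_le (s : List Char) :
    (PySem.Chars.rstrip s).length ≤ s.length := by
  simp [PySem.Chars.rstrip]
  have := List.length_dropWhile_le PySem.Chars.isspace s.reverse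
  simpa using this

lemma pv_lstrip_of_strip {s : List Char} (h : PySem.Chars.strip s = s) :
    PySem.Chars.lstrip s = s := by
  have hsuf : PySem.Chars.lstrip s <:+ s := List.dropWhile_suffix _
  have hlen : (PySem.Chars.lstrip s).length = s.length := by
    have h1 := pv_length_rstrip_le (PySem.Chars.lstrip s)
    have h2 : (PySem.Chars.lstrip s).length ≤ s.length := hsuf.length_le
    have h3 : (PySem.Chars.strip s).length = s.length := by rw [h]
    simp [PySem.Chars.strip] at h3
    omega
  exact hsuf.eq_of_length hlen

lemma pv_rstrip_of_strip {s : List Char} (h : PySem.Chars.strip s = s) :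
    PySem.Chars.rstrip s = s := by
  have := pv_lstrip_of_strip h
  simpa [PySem.Chars.strip, this] using h

lemma pv_clean_head {c : Char} {t : List Char} (h : pvClean (c :: t)) :
    PySem.Chars.isspace c = false := by
  have := pv_lstrip_of_strip h.2
  exact pv_dropWhile_cons_of_head this

lemma pv_rev_dropWhile {s : List Char} (h : PySem.Chars.rstrip s = s) :
    List.dropWhile PySem.Chars.isspace s.reverse = s.reverse := by
  have : (List.dropWhile PySem.Chars.isspace s.reverse).reverse = s := h
  have := congrArg List.reverse this
  simpa using this

lemma pv_clean_last {s : List Char} (h : pvClean s) :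
    ∃ c t, s.reverse = c :: t ∧ PySem.Chars.isspace c = false := by
  obtain ⟨hne, hs⟩ := h
  have hrev : s.reverse ≠ [] := by simpa using hne
  obtain ⟨c, t, hct⟩ := List.exists_cons_of_ne_nil hrev
  refine ⟨c, t, hct, ?_⟩
  have := pv_rev_dropWhile (pv_rstrip_of_strip hs)
  rw [hct] at this
  exact pv_dropWhile_cons_of_head this

lemma pv_head_dropWhile_not {p : Char → Bool} {l : List Char} {c : Char} {t : List Char}
    (h : List.dropWhile p l = c :: t) : p c = false := by
  induction l with
  | nil => simp at h
  | cons a l ih =>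
    rw [List.dropWhile_cons] at h
    split at h
    · exact ih h
    · cases h
      exact Bool.eq_false_iff.mpr ‹¬ _›

lemma pv_rstrip_prefix (s : List Char) : PySem.Chars.rstrip s <+: s := by
  have h : List.dropWhile PySem.Chars.isspace s.reverse <:+ s.reverse :=
    List.dropWhile_suffix _
  have h2 : (PySem.Chars.rstrip s).reverse <:+ s.reverse := by
    simpa [PySem.Chars.rstrip] using h
  exact List.reverse_suffix.mp h2

lemma pv_strip_idem (s : List Char) : pvClean (PySem.Chars.strip s) ∨ PySem.Chars.strip s = [] := by
  cases hu : PySem.Chars.strip s with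
  | nil => exact Or.inr rfl
  | cons c t =>
    left
    refine ⟨by simp, ?_⟩
    -- head c is not space
    have hpre : PySem.Chars.rstrip (PySem.Chars.lstrip s) <+: PySem.Chars.lstrip s :=
      pv_rstrip_prefix _
    have hu' : PySem.Chars.strip s = c :: t := hu
    have hchead : PySem.Chars.isspace c = false := by
      rw [PySem.Chars.strip] at hu'
      obtain ⟨u, hu2⟩ := hpre
      rw [hu'] at hu2
      -- lstrip s = c :: (t ++ u), head of dropWhile is non-space
      have : List.dropWhile PySem.Chars.isspace s = c :: (t ++ u) := by
        simpa [PySem.Chars.lstrip] using hu2.symm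
      exact pv_head_dropWhile_not this
    -- last is not space
    have hlast : ∃ d u, (c :: t).reverse = d :: u ∧ PySem.Chars.isspace d = false := by
      have : (PySem.Chars.strip s).reverse = List.dropWhile PySem.Chars.isspace (PySem.Chars.lstrip s).reverse := by
        simp [PySem.Chars.strip, PySem.Chars.rstrip]
      rw [hu'] at this
      have hne : (c :: t).reverse ≠ [] := by simp
      obtain ⟨d, u, hdu⟩ := List.exists_cons_of_ne_nil hne
      refine ⟨d, u, hdu, ?_⟩
      rw [hdu] at this
      exact pv_head_dropWhile_not this.symm
    -- assemble: lstrip and rstrip fix c :: t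
    obtain ⟨d, u, hdu, hd⟩ := hlast
    have h1 : PySem.Chars.lstrip (c :: t) = c :: t := by
      simp [PySem.Chars.lstrip, hchead]
    have h2 : PySem.Chars.rstrip (c :: t) = c :: t := by
      simp only [PySem.Chars.rstrip, hdu, List.dropWhile_cons, hd, if_neg Bool.false_ne_true]
      simpa using (congrArg List.reverse hdu).symm
    simp [PySem.Chars.strip, h1, h2]

lemma pv_clean_append {a b : List Char} (ha : pvClean a) (hb : pvClean b) :
    pvClean (a ++ ' ' :: b) := by
  obtain ⟨c, t, hct⟩ := List.exists_cons_of_ne_nil ha.1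
  refine ⟨by simp, ?_⟩
  have h1 : PySem.Chars.lstrip (a ++ ' ' :: b) = a ++ ' ' :: b := by
    rw [hct]
    have := pv_clean_head (hct ▸ ha)
    simp [PySem.Chars.lstrip, this]
  obtain ⟨d, u, hdu, hd⟩ := pv_clean_last hb
  have h2 : PySem.Chars.rstrip (a ++ ' ' :: b) = a ++ ' ' :: b := by
    have hrev : (a ++ ' ' :: b).reverse = d :: (u ++ ' ' :: a.reverse) := by
      simp [hdu]
    simp only [PySem.Chars.rstrip, hrev, List.dropWhile_cons, hd, if_neg Bool.false_ne_true]
    have := congrArg List.reverse hrev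
    simpa using this.symm
  simp [PySem.Chars.strip, h1, h2]

lemma pv_stepA_eq (st : List String × List Char) (l : List Char) :
    pvStepA st l = if PySem.Chars.strip l = [] then st else pvCleanStep st (PySem.Chars.strip l) := by
  by_cases h : PySem.Chars.strip l = []
  · simp [pvStepA, h]
  · simp [pvStepA, pvCleanStep, h, pvBoundary]

lemma pv_fold_filter (raw : List (List Char)) (st : List String × List Char) :
    raw.foldl pvStepA st =
      ((raw.map PySem.Chars.strip).filter (fun l => decide (l ≠ []))).foldl pvCleanStep st := by
  induction raw generalizing st with
  | nil => rfl
  | cons l rest ih =>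
    by_cases h : PySem.Chars.strip l = []
    · simp [List.foldl_cons, pv_stepA_eq, h, ih]
    · simp [List.foldl_cons, pv_stepA_eq, h, ih]

lemma pv_fold_group (lines : List (List Char)) (hc : ∀ l ∈ lines, pvClean l)
    (steps : List String) (cur : List Char) (hcur : pvClean cur) :
    pvFin (lines.foldl pvCleanStep (steps, cur)) =
      steps ++ String.ofList (PySem.Chars.join [' '] (cur :: lines.takeWhile (fun s => !pvBoundary s)))
        :: pvGroup (lines.dropWhile (fun s => !pvBoundary s)) := by
  induction lines generalizing steps cur with
  | nil =>
    simp [pvFin, hcur.1, hcur.2, PySem.Chars.join_singleton, pvGroup]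
  | cons l rest ih =>
    have hcl : pvClean l := hc l (by simp)
    have hcrest : ∀ x ∈ rest, pvClean x := fun x hx => hc x (by simp [hx])
    cases hb : pvBoundary l with
    | true =>
      have hstep : pvCleanStep (steps, cur) l = (steps ++ [String.ofList cur], l) := by
        simp [pvCleanStep, hb, hcur.1, hcur.2]
      rw [List.foldl_cons, hstep, ih hcrest _ _ hcl]
      simp [hb, pvGroup, PySem.Chars.join_singleton]
    | false =>
      have hstep : pvCleanStep (steps, cur) l = (steps, cur ++ ' ' :: l) := by
        simp [pvCleanStep, hb, hcur.1]
      rw [List.foldl_cons, hstep, ih hcrest _ _ (pv_clean_append hcur hcl)]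
      rw [List.takeWhile_cons, List.dropWhile_cons]
      simp only [hb, Bool.not_false, if_true]
      cases hrt : rest.takeWhile (fun s => !pvBoundary s) with
      | nil => simp [PySem.Chars.join_cons_cons, PySem.Chars.join_singleton]
      | cons q qs =>
        rw [PySem.Chars.join_cons_cons [' '] (cur ++ ' ' :: l) q qs,
            PySem.Chars.join_cons_cons [' '] cur l (q :: qs),
            PySem.Chars.join_cons_cons [' '] l q qs]
        simp

lemma pv_start (lines : List (List Char)) (h : ∀ l ∈ lines, pvClean l) :
    pvFin (lines.foldl pvCleanStep ([], [])) = pvGroup lines := by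
  cases lines with
  | nil => simp [pvFin, pvGroup]
  | cons l rest =>
    have hcl : pvClean l := h l (by simp)
    have hstep : pvCleanStep (([] : List String), ([] : List Char)) l = ([], l) := by
      simp [pvCleanStep]
    rw [List.foldl_cons, hstep,
      pv_fold_group rest (fun x hx => h x (by simp [hx])) [] l hcl]
    simp only [pvGroup]
    simp

-- ===== VERDICT (by name: the statement is the Claim_ definition above) =====
theorem parse_reasoning_steps_spec : Claim_equal_parse_reasoning_steps := by
  intro t _
  unfold Spec_parse_reasoning_steps parse_reasoning_steps parse_reasoning_steps_alt
  show parse_reasoning_steps t = parse_reasoning_steps_alt t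
  have hA : parse_reasoning_steps t =
      pvFin ((PySem.Chars.splitOn t.toList ['\n']).foldl pvStepA ([], [])) := rfl
  rw [hA, pv_fold_filter]
  apply pv_start
  intro l hl
  simp only [List.mem_filter, List.mem_map, decide_eq_true_eq] at hl
  obtain ⟨⟨x, _, hx⟩, hne⟩ := hl
  rcases pv_strip_idem x with h | h
  · rwa [hx] at h
  · exact absurd (hx ▸ h) hne
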